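-- pv_equiv track=rewrite | github.com/charlesyifanli/algorithm | lanqiaocup/competition/03032024/6.py | f
-- ===== SOURCE A (Python) =====
-- def f(n: int) -> int:
--     if n == 0:
--         return 0
--     elif n == 1:
--         return 1
--     elif n == 2:
--         return 1
--     elif n == 3:
--         return 1
--     else:
--         return min(f(n - 1), f(n - 2), f(n - 3)) + 1
-- ===== SOURCE B (Python) =====
-- def f(n: int) -> int:
--     # closed form: f(n) = ceil(n/3) for n >= 0
--     return (n + 2) // 3
-- ===== Notes on version B (the rewrite author's own statement) =====
-- stated objective: simpler
-- what changed: Replaces the exponential three-way recursion with the closed form ceil(n/3) = (n+2)//3.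
-- crash fix: For n < 0 (no base case is ever reached) and for n >= 1000 (recursion depth n exceeds CPython's default recursion limit) A raises RecursionError; B returns (n+2)//3 there. — e.g. on f(-1): A raises RecursionError, B returns 0
import Mathlib
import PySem

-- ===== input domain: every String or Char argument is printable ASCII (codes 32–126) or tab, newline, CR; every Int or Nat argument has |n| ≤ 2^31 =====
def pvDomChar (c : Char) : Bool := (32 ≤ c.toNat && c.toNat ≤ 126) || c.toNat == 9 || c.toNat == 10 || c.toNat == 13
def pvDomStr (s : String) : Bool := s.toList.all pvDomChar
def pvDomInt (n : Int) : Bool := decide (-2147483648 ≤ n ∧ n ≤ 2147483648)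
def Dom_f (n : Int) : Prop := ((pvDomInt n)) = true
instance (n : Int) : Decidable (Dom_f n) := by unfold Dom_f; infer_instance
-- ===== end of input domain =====

-- B replaces A's three-way recursion with the closed form (n+2)//3; objective: simpler (one line, no recursion).


-- ===== PORT A =====
-- A recurses on n-1, n-2, n-3; for n ≥ 0 this is well-founded, so the port recurses on
-- the Nat value of n (Pre_f restricts to n ≥ 0, where A terminates).
def fA : Nat → Int
  | 0 => 0
  | 1 => 1
  | 2 => 1
  | 3 => 1
  | (k + 4) => min (fA (k + 3)) (min (fA (k + 2)) (fA (k + 1))) + 1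

def f (n : Int) : Int := fA n.toNat

-- ===== PORT B =====
def f_alt (n : Int) : Int := PySem.Int.floordiv (n + 2) 3

-- ===== PRECONDITION & SPEC =====
-- Pre_f excludes n < 0 (A's recursion never reaches a base case) and n ≥ 1000 (the
-- recursion depth n exceeds CPython's default recursion limit): A raises RecursionError there.
def Pre_f (n : Int) : Prop := 0 ≤ n ∧ n < 1000
instance (n : Int) : Decidable (Pre_f n) := by unfold Pre_f; infer_instance
def pvWitness_f : Int := 7

-- For n < 0 and for n ≥ 1000 A raises RecursionError (no base case / recursion depth n over CPython's default limit); B returns (n+2)//3 there.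
def Raises_f (n : Int) : Prop := n < 0 ∨ 1000 ≤ n
instance (n : Int) : Decidable (Raises_f n) := by unfold Raises_f; infer_instance
def pvRaiseWitness_f : Int := -1
def pvRaiseWitnessOut_f : Int := 0

def Spec_f (n : Int) (out : Int) : Prop := out = f_alt n
instance (n : Int) (out : Int) : Decidable (Spec_f n out) := by unfold Spec_f; infer_instance

-- ===== CLAIM (what is proved, stated in full; the proofs are below) =====
def Claim_equal_f : Prop := ∀ (n : Int), Dom_f n → Pre_f n → Spec_f n (f n)
def Claim_raises_f : Prop := (∀ (n : Int), Dom_f n → Raises_f n → ¬ Pre_f n) ∧ (Dom_f (pvRaiseWitness_f) ∧ Raises_f (pvRaiseWitness_f) ∧ f_alt (pvRaiseWitness_f) = pvRaiseWitnessOut_f)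

-- ===== LEMMAS AND PROOFS =====

-- characterisation of A's recursion: fA k = ⌈k/3⌉ = (k+2)/3 (Nat division)
theorem fA_closed : ∀ (k : Nat), fA k = ((k : Int) + 2) / 3 := by
  intro k
  induction k using Nat.strong_induction_on with
  | _ k ih =>
    match k with
    | 0 => decide
    | 1 => decide
    | 2 => decide
    | 3 => decide
    | (m + 4) =>
      rw [fA, ih (m + 3) (by omega), ih (m + 2) (by omega), ih (m + 1) (by omega)]
      push_cast
      rw [min_def, min_def]
      split_ifs <;> omega

-- ===== VERDICT (by name: the statement is the Claim_ definition above) =====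
theorem f_spec : Claim_equal_f := by
  intro n _ hpre
  obtain ⟨hpre, -⟩ := hpre
  unfold Spec_f f f_alt
  rw [fA_closed]
  have hn : (n.toNat : Int) = n := Int.toNat_of_nonneg hpre
  simp only [PySem.Int.floordiv, Int.fdiv_eq_ediv_of_nonneg _ (by norm_num : (0:Int) ≤ 3)]
  omega

@[simp] theorem f_raises : Claim_raises_f := by
  unfold Claim_raises_f
  exact ⟨by intro n _ h hp; unfold Raises_f at h; unfold Pre_f at hp; omega, by decide⟩
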